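-- pv_equiv track=rewrite | github.com/Baladon23/Imightcomebackhere4sg | lsec.py | lsec
-- ===== SOURCE A (Python) =====
-- def lsec(a, b, c, l):
--     if a == 0:
--         return c
--     while a < b:
--         a *= 10
--         c += 1
--     if a%b in l:
--         return c
--     return lsec(a%b, b, c+1, l+[a%b])
-- ===== SOURCE B (Python) =====
-- def lsec(a, b, c, l):
--     if a == 0:
--         return c
--     incs = []            # per-step digit increments, summed at the end
--     seen = list(l)
--     r = a
--     while True:
--         t = (b - 1) // r
--         k = 0
--         while t > 0:
--             t //= 10
--             k += 1
--         r = (r * 10 ** k) % b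
--         if r in seen:
--             incs.append(k)
--             break
--         if r == 0:
--             incs.append(k + 1)
--             break
--         incs.append(k + 1)
--         seen.append(r)
--     return c + sum(incs)
-- ===== Notes on version B (the rewrite author's own statement) =====
-- stated objective: alternative
-- what changed: A's recursion with a running counter and a repeated-multiplication inner loop is replaced by a two-stage computation: an iterative pass first collects the per-step digit increments (each obtained by dividing (b-1)//r down by 10) into a list, and the answer is c plus the sum of that list.
-- outside the precondition, e.g. on lsec(-3, -7, 0, []): A returns 1, B returns 13; on lsec(5, -3, 0, []): A returns 1, B returns 2; on lsec(5, 0, 0, []): A raises ZeroDivisionError, B raises ZeroDivisionError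
import Mathlib
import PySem

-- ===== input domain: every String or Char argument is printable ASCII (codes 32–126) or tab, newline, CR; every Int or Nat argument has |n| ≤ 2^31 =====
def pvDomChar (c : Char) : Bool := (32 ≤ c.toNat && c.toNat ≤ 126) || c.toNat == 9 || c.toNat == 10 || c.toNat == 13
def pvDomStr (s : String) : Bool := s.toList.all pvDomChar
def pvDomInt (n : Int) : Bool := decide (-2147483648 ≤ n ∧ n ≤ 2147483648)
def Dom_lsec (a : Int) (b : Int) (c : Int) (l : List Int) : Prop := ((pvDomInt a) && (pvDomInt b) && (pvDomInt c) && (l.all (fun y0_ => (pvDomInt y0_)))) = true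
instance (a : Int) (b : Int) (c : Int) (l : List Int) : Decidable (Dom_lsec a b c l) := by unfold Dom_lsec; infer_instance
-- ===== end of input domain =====

-- B replaces A's counter-accumulating recursion (with its repeated-multiplication inner loop) by a
-- two-stage computation: first build the list of per-step digit increments, then return c + its sum
-- (objective: alternative decomposition, same cost).

-- ===== PORT A =====
-- the fuel arguments only make the recursions total; inside Pre_lsec they are never exhausted
-- inner `while a < b: a *= 10; c += 1`
def lsecMul (b : Int) : Nat → Int → Int → Int × Int
  | 0, a, c => (a, c)
  | f+1, a, c => if a < b then lsecMul b f (a * 10) (c + 1) else (a, c)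

def lsecGo (b : Int) : Nat → Int → Int → List Int → Int
  | 0, _, c, _ => c
  | f+1, a, c, l =>
    if a = 0 then c
    else
      let p := lsecMul b (b.natAbs + 2) a c
      let r := PySem.Int.mod p.1 b
      if r ∈ l then p.2
      else lsecGo b f r (p.2 + 1) (l ++ [r])

def lsec (a : Int) (b : Int) (c : Int) (l : List Int) : Int :=
  lsecGo b (b.natAbs + 2) a c l

-- ===== PORT B =====
-- inner `while t > 0: t //= 10; k += 1`
def lsecDigits : Nat → Int → Nat → Nat
  | 0, _, k => k
  | f+1, t, k => if 0 < t then lsecDigits f (PySem.Int.floordiv t 10) (k + 1) else k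

-- stage 1 of Source B's loop: the list `incs` of per-step increments (fuel exhaustion yields [])
def lsecIncs (b : Int) : Nat → Int → List Int → List Int
  | 0, _, _ => []
  | f+1, r0, seen =>
    let k := lsecDigits (b.natAbs + 2) (PySem.Int.floordiv (b - 1) r0) 0
    let r := PySem.Int.mod (r0 * 10 ^ k) b
    if r ∈ seen then [(k : Int)]
    else if r = 0 then [(k : Int) + 1]
    else ((k : Int) + 1) :: lsecIncs b f r (seen ++ [r])

-- stage 2: c + sum(incs)
def lsec_alt (a : Int) (b : Int) (c : Int) (l : List Int) : Int :=
  if a = 0 then c else c + (lsecIncs b (b.natAbs + 2) a l).sum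

-- ===== PRECONDITION & SPEC =====
-- Pre_ excludes b = 0 with a ≠ 0 (A raises ZeroDivisionError), negative a with positive b and the
-- deep negative cases (A's `while a < b: a *= 10` loops forever), and the remaining negative a/b
-- corners, where A terminates only through Python's negative-modulus accident and B's digit-count
-- rewrite legitimately disagrees.
def Pre_lsec (a : Int) (b : Int) (c : Int) (l : List Int) : Prop := a = 0 ∨ (1 ≤ a ∧ 1 ≤ b)
instance (a : Int) (b : Int) (c : Int) (l : List Int) : Decidable (Pre_lsec a b c l) := by unfold Pre_lsec; infer_instance
def pvWitness_lsec : Int × Int × Int × List Int := (2, 3, 0, [])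
def Spec_lsec (a : Int) (b : Int) (c : Int) (l : List Int) (out : Int) : Prop := out = lsec_alt a b c l
instance (a : Int) (b : Int) (c : Int) (l : List Int) (out : Int) : Decidable (Spec_lsec a b c l out) := by unfold Spec_lsec; infer_instance

-- ===== CLAIM (what is proved, stated in full; the proofs are below) =====
def Claim_equal_lsec : Prop := ∀ (a : Int) (b : Int) (c : Int) (l : List Int), Dom_lsec a b c l → Pre_lsec a b c l → Spec_lsec a b c l (lsec a b c l)

-- ===== LEMMAS AND PROOFS =====

-- mathematical digit count: number of times t must be divided by 10 to reach 0
def dval (t : Int) : Nat :=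
  if h : 0 < t then dval (t / 10) + 1 else 0
termination_by t.toNat
decreasing_by
  have h1 : t / 10 * 10 ≤ t := Int.ediv_mul_le t (by norm_num)
  omega

theorem dval_of_nonpos {t : Int} (h : ¬ 0 < t) : dval t = 0 := by
  rw [dval]; simp [h]

theorem dval_of_pos {t : Int} (h : 0 < t) : dval t = dval (t / 10) + 1 := by
  rw [dval]; simp [h]

theorem lsecDigits_eq_dval : ∀ (f : Nat) (t : Int) (k : Nat), t.toNat < f →
    lsecDigits f t k = k + dval t := by
  intro f
  induction f with
  | zero => intro t k h; omega
  | succ f ih =>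
    intro t k h
    by_cases hp : 0 < t
    · have he : PySem.Int.floordiv t 10 = t / 10 :=
        PySem.Int.floordiv_eq_ediv_of_pos (by norm_num)
      have h1 : t / 10 * 10 ≤ t := Int.ediv_mul_le t (by norm_num)
      have hf : (t / 10).toNat < f := by omega
      simp only [lsecDigits, if_pos hp, he, ih _ _ hf, dval_of_pos hp]
      omega
    · simp only [lsecDigits, if_neg hp, dval_of_nonpos hp]; omega

theorem lsecMul_eq : ∀ (f : Nat) (a c b : Int), 1 ≤ a → 1 ≤ b → b ≤ a * 10 ^ f →
    lsecMul b f a c = (a * 10 ^ dval ((b - 1) / a), c + (dval ((b - 1) / a) : Int)) := by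
  intro f
  induction f with
  | zero =>
    intro a c b ha hb hle
    have hm : (b - 1) / a = 0 := Int.ediv_eq_zero_of_lt (by omega) (by simpa using hle)
    simp [lsecMul, hm, dval_of_nonpos]
  | succ f ih =>
    intro a c b ha hb hle
    by_cases hab : a < b
    · have hm1 : 1 ≤ (b - 1) / a := by
        rw [Int.le_ediv_iff_mul_le (by omega)]; omega
      have hdd : (b - 1) / a / 10 = (b - 1) / (a * 10) :=
        Int.ediv_ediv_of_nonneg (by omega)
      have ih' := ih (a * 10) (c + 1) b (by omega) hb
        (by rw [show a * 10 * 10 ^ f = a * 10 ^ (f + 1) by rw [pow_succ]; ring]; exact hle)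
      simp only [lsecMul, if_pos hab, ih', dval_of_pos (show (0:Int) < (b-1)/a by omega), hdd]
      rw [Prod.mk.injEq]
      exact ⟨by rw [pow_succ]; ring, by push_cast; ring⟩
    · have hm : (b - 1) / a = 0 := Int.ediv_eq_zero_of_lt (by omega) (by omega)
      simp [lsecMul, hab, hm, dval_of_nonpos]

theorem go_zero (b c : Int) (l : List Int) : ∀ f, lsecGo b f 0 c l = c := by
  intro f; cases f <;> simp [lsecGo]

theorem go_eq_incs : ∀ (f : Nat) (a c b : Int) (l : List Int), 1 ≤ b → 1 ≤ a →
    lsecGo b f a c l = c + (lsecIncs b f a l).sum := by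
  intro f
  induction f with
  | zero => intro a c b l hb ha; simp [lsecGo, lsecIncs]
  | succ f ih =>
    intro a c b l hb ha
    have h0 : a ≠ 0 := by omega
    have hpow : (b : Int) ≤ a * 10 ^ (b.natAbs + 2) := by
      have h1 : b.natAbs < 2 ^ b.natAbs := Nat.lt_two_pow_self
      have h2 : (2:Nat) ^ b.natAbs ≤ 10 ^ b.natAbs := Nat.pow_le_pow_left (by norm_num) _
      have h3 : (b.natAbs : Int) < 10 ^ b.natAbs := by exact_mod_cast lt_of_lt_of_le h1 h2
      have h4 : (10:Int) ^ b.natAbs ≤ 10 ^ (b.natAbs + 2) :=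
        pow_le_pow_right₀ (by norm_num) (by omega)
      have h5 : b ≤ (b.natAbs : Int) := Int.le_natAbs
      nlinarith [pow_pos (show (0:Int) < 10 by norm_num) (b.natAbs + 2)]
    have hfd : PySem.Int.floordiv (b - 1) a = (b - 1) / a :=
      PySem.Int.floordiv_eq_ediv_of_pos (by omega)
    have hmle : (b - 1) / a ≤ b - 1 := Int.ediv_le_self a (by omega)
    have hmnn : 0 ≤ (b - 1) / a := Int.ediv_nonneg (by omega) (by omega)
    have hdig : ((b - 1) / a).toNat < b.natAbs + 2 := by omega
    have hmul := lsecMul_eq (b.natAbs + 2) a c b ha hb hpow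
    have hdg := lsecDigits_eq_dval (b.natAbs + 2) ((b - 1) / a) 0 hdig
    simp only [lsecGo, lsecIncs, if_neg h0, hmul, hfd, hdg, Nat.zero_add]
    have hrnn : 0 ≤ PySem.Int.mod (a * 10 ^ dval ((b - 1) / a)) b := by
      rw [PySem.Int.mod_eq_emod_of_pos (by omega)]
      exact Int.emod_nonneg _ (by omega)
    set r := PySem.Int.mod (a * 10 ^ dval ((b - 1) / a)) b with hr
    by_cases hmem : r ∈ l
    · simp [hmem, List.sum_cons]
    · by_cases hz : r = 0
      · rw [if_neg hmem, if_neg hmem, if_pos hz, hz, go_zero]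
        simp only [List.sum_cons, List.sum_nil]
        ring
      · have hr1 : 1 ≤ r := by omega
        simp only [if_neg hmem, if_neg hz, List.sum_cons, ih r (c + (dval ((b-1)/a) : Int) + 1) b (l ++ [r]) hb hr1]
        ring

-- ===== VERDICT (by name: the statement is the Claim_ definition above) =====
theorem lsec_spec : Claim_equal_lsec := by
  intro a b c l _hdom hpre
  unfold Spec_lsec lsec lsec_alt
  rcases hpre with h0 | ⟨ha, hb⟩
  · subst h0; simp [go_zero]
  · rw [if_neg (by omega : ¬ a = 0)]
    exact go_eq_incs (b.natAbs + 2) a c b l hb ha
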